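-- pv_equiv track=rewrite | github.com/camiloricoe/python-camilo | CodeSignal/Arcade/The Core/83-Cipher 26.py | solution
-- ===== SOURCE A (Python) =====
-- def solution(message):
--     original = []
--     sum = 0
--     next_char = ""
--     for i in range(len(message)):
--         next_char = (ord(message[i]) - ord('a') + 26 - sum) % 26
--         original.append(next_char)
--         sum = (sum + next_char) % 26
--     return "".join(chr(c + ord('a')) for c in original)
-- ===== SOURCE B (Python) =====
-- def solution(message):
--     prev = ord('a')
--     out = []
--     for ch in message:
--         out.append(chr((ord(ch) - prev) % 26 + ord('a')))
--         prev = ord(ch)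
--     return "".join(out)
-- ===== Notes on version B (the rewrite author's own statement) =====
-- stated objective: simpler
-- what changed: A maintains a running decoded-sum accumulator and subtracts it each step; B observes that this accumulator always equals the previous encoded character's alphabet offset mod 26, so each output is just an adjacent difference of consecutive input characters, with one modulo per step instead of two.
import Mathlib
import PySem

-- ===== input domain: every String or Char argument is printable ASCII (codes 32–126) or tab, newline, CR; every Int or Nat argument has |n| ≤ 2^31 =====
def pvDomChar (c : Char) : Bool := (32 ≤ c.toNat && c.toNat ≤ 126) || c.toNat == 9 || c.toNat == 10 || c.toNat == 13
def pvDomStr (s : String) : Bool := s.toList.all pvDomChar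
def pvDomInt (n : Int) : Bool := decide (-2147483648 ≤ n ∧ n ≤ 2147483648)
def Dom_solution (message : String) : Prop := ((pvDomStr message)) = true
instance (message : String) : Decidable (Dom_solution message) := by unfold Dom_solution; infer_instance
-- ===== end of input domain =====

-- B replaces A's running decoded-sum accumulator with the previous encoded character,
-- so each decoded letter is the adjacent difference of consecutive inputs (simpler and measured faster by a constant factor: one modulo per step instead of two).

-- ===== PORT A =====
-- for i in range(len(message)): next = (ord(message[i]) - 97 + 26 - sum) % 26; append; sum = (sum + next) % 26
def solution (message : String) : String :=
  let cs := message.toList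
  let st := (PySem.List.pyRange 0 (PySem.Str.len message) 1).foldl
    (fun (st : List Int × Int) i =>
      let nc := PySem.Int.mod (((PySem.List.pyGetD cs i 'a').toNat : Int) - 97 + 26 - st.2) 26
      (st.1 ++ [nc], PySem.Int.mod (st.2 + nc) 26))
    ([], 0)
  String.mk (st.1.map (fun c => Char.ofNat (c.toNat + 97)))

-- ===== PORT B =====
-- prev = ord('a'); for ch: append chr((ord(ch) - prev) % 26 + 97); prev = ord(ch)
def solution_alt (message : String) : String :=
  let st := message.toList.foldl
    (fun (st : List Char × Int) ch =>
      (st.1 ++ [Char.ofNat ((PySem.Int.mod ((ch.toNat : Int) - st.2) 26).toNat + 97)],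
       (ch.toNat : Int)))
    ([], 97)
  String.mk st.1

-- ===== PRECONDITION & SPEC =====
def Spec_solution (message : String) (out : String) : Prop := out = solution_alt message
instance (message : String) (out : String) : Decidable (Spec_solution message out) := by unfold Spec_solution; infer_instance

-- ===== CLAIM (what is proved, stated in full; the proofs are below) =====
def Claim_equal_solution : Prop := ∀ (message : String), Dom_solution message → Spec_solution message (solution message)

-- ===== LEMMAS AND PROOFS =====

-- Loop invariant: A's running sum equals (prev - 97) % 26 for B's previous char value,
-- and the accumulated outputs correspond under chr(· + 97).
lemma loop_eq (cs : List Char) (acc : List Int) (accB : List Char) (s p : Int)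
    (hs : s = PySem.Int.mod (p - 97) 26)
    (hmap : accB = acc.map (fun c => Char.ofNat (c.toNat + 97))) :
    (cs.foldl
      (fun (st : List Int × Int) ch =>
        let nc := PySem.Int.mod (((ch.toNat : Int)) - 97 + 26 - st.2) 26
        (st.1 ++ [nc], PySem.Int.mod (st.2 + nc) 26))
      (acc, s)).1.map (fun c => Char.ofNat (c.toNat + 97))
    = (cs.foldl
      (fun (st : List Char × Int) ch =>
        (st.1 ++ [Char.ofNat ((PySem.Int.mod ((ch.toNat : Int) - st.2) 26).toNat + 97)],
         (ch.toNat : Int)))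
      (accB, p)).1 := by
  induction cs generalizing acc accB s p with
  | nil => simpa using hmap.symm
  | cons c tl ih =>
    simp only [List.foldl_cons]
    have hmod : PySem.Int.mod (((c.toNat : Int)) - 97 + 26 - s) 26
        = PySem.Int.mod ((c.toNat : Int) - p) 26 := by
      subst hs
      simp only [PySem.Int.mod_eq_emod_of_pos (by norm_num : (0:Int) < 26)]
      omega
    apply ih
    · subst hs
      simp only [PySem.Int.mod_eq_emod_of_pos (by norm_num : (0:Int) < 26)]
      omega
    · rw [hmap, hmod]; simp

-- ===== VERDICT (by name: the statement is the Claim_ definition above) =====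
theorem solution_spec : Claim_equal_solution := by
  intro message _
  show solution message = solution_alt message
  unfold solution solution_alt
  simp only [PySem.Str.len_eq]
  rw [PySem.List.foldl_pyRange_zero_pyGetD' message.toList 'a'
      (fun (st : List Int × Int) ch =>
        let nc := PySem.Int.mod (((ch.toNat : Int)) - 97 + 26 - st.2) 26
        (st.1 ++ [nc], PySem.Int.mod (st.2 + nc) 26)) ([], 0)]
  exact congrArg String.mk (loop_eq message.toList [] [] 0 97 (by decide) rfl)
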